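/- GENERATED by c/gen_code.py from base.elf, the BASE only (the same in every program): where each function is linked. -/
import X86.Derived.User.State
namespace ProgX.Base.Code
open X86

def addr__start : Word := 0x100000
def addr___asan_report : Word := 0x100059
def addr_range_bad : Word := 0x100200
def addr___asan_load1_noabort : Word := 0x100300
def addr___asan_store1_noabort : Word := 0x1003c0
def addr___asan_load2_noabort : Word := 0x100480
def addr___asan_store2_noabort : Word := 0x100560
def addr___asan_load4_noabort : Word := 0x100640
def addr___asan_store4_noabort : Word := 0x100720
def addr___asan_load8_noabort : Word := 0x100800
def addr___asan_store8_noabort : Word := 0x1008e0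
def addr___asan_load16_noabort : Word := 0x1009c0
def addr___asan_store16_noabort : Word := 0x100a80
def addr___asan_storeN_noabort : Word := 0x100b40
def addr_arena_unpoison : Word := 0x100c00
def addr_arena_poison : Word := 0x100cc0
def addr___asan_register_globals : Word := 0x100d60
def addr_run_ctors : Word := 0x100e60
def addr___asan_loadN_noabort : Word := 0x100f00
def addr___asan_handle_no_return : Word := 0x100fc0
def addr___asan_unregister_globals : Word := 0x101060
def addr_swap_bytes : Word := 0x101200
def addr_sift_down : Word := 0x101300
def addr_memcpy : Word := 0x101440
def addr_memset : Word := 0x101520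
def addr_memcmp : Word := 0x1015e0
def addr_abs : Word := 0x1016e0
def addr_qsort : Word := 0x1018c0
def addr_two_to : Word := 0x101d00
def addr_pow_int : Word := 0x101da0
def addr_sin_poly : Word := 0x101e60
def addr_cos_poly : Word := 0x102040
def addr_ldexp : Word := 0x102200
def addr_floor : Word := 0x102380
def addr_sincos_quadrant : Word := 0x102440
def addr_exp : Word := 0x1025c0
def addr_log : Word := 0x102920
def addr_pow : Word := 0x102ca0
def addr_sin : Word := 0x102dc0
def addr_cos : Word := 0x102e60
def addr_malloc : Word := 0x103200
def addr_calloc : Word := 0x103500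
def addr_free : Word := 0x103800
def addr_realloc : Word := 0x103b00
def addr_reallocarray : Word := 0x103e00
def addr_heap_alloc : Word := 0x104100
def addr_heap_live_size : Word := 0x104200
def addr_heap_product_ok : Word := 0x104300

/-- Every function: name, address, size in bytes. -/
def functions : List (String × Word × Nat) :=
  [ ("_start", 0x100000, 89)
  , ("__asan_report", 0x100059, 64)
  , ("range_bad", 0x100200, 105)
  , ("__asan_load1_noabort", 0x100300, 56)
  , ("__asan_store1_noabort", 0x1003c0, 56)
  , ("__asan_load2_noabort", 0x100480, 79)
  , ("__asan_store2_noabort", 0x100560, 79)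
  , ("__asan_load4_noabort", 0x100640, 79)
  , ("__asan_store4_noabort", 0x100720, 79)
  , ("__asan_load8_noabort", 0x100800, 79)
  , ("__asan_store8_noabort", 0x1008e0, 79)
  , ("__asan_load16_noabort", 0x1009c0, 38)
  , ("__asan_store16_noabort", 0x100a80, 38)
  , ("__asan_storeN_noabort", 0x100b40, 50)
  , ("arena_unpoison", 0x100c00, 40)
  , ("arena_poison", 0x100cc0, 27)
  , ("__asan_register_globals", 0x100d60, 97)
  , ("run_ctors", 0x100e60, 25)
  , ("__asan_loadN_noabort", 0x100f00, 50)
  , ("__asan_handle_no_return", 0x100fc0, 1)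
  , ("__asan_unregister_globals", 0x101060, 1)
  , ("swap_bytes", 0x101200, 102)
  , ("sift_down", 0x101300, 156)
  , ("memcpy", 0x101440, 91)
  , ("memset", 0x101520, 61)
  , ("memcmp", 0x1015e0, 109)
  , ("abs", 0x1016e0, 11)
  , ("qsort", 0x1018c0, 131)
  , ("two_to", 0x101d00, 16)
  , ("pow_int", 0x101da0, 37)
  , ("sin_poly", 0x101e60, 225)
  , ("cos_poly", 0x102040, 221)
  , ("ldexp", 0x102200, 186)
  , ("floor", 0x102380, 62)
  , ("sincos_quadrant", 0x102440, 190)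
  , ("exp", 0x1025c0, 420)
  , ("log", 0x102920, 443)
  , ("pow", 0x102ca0, 136)
  , ("sin", 0x102dc0, 11)
  , ("cos", 0x102e60, 11)
  , ("malloc", 0x103200, 37)
  , ("calloc", 0x103500, 74)
  , ("free", 0x103800, 36)
  , ("realloc", 0x103b00, 187)
  , ("reallocarray", 0x103e00, 55)
  , ("heap_alloc", 0x104100, 94)
  , ("heap_live_size", 0x104200, 117)
  , ("heap_product_ok", 0x104300, 58) ]

end ProgX.Base.Code
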